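-- pv_equiv track=rewrite | github.com/SiwenLi666/SIWRA_pension | src/retriever/document_processor.py | detect_visual_chapter
-- ===== SOURCE A (Python) =====
-- from typing import List, Dict, Optional, Tuple, Any
--
-- def detect_visual_chapter(text: str) -> Optional[str]:
--     lines = text.strip().splitlines()
--     for i, line in enumerate(lines):
--         if line.strip() and 2 <= len(line.split()) <= 6:
--             prev_empty = i == 0 or not lines[i - 1].strip()
--             next_empty = i + 1 >= len(lines) or not lines[i + 1].strip()
--             is_title_like = line.strip()[0].isupper()
--             if prev_empty and next_empty and is_title_like:
--                 return line.strip()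
--     return None
-- ===== SOURCE B (Python) =====
-- from typing import Optional
--
-- def detect_visual_chapter(text: str) -> Optional[str]:
--     lines = text.strip().splitlines()
--     n = len(lines)
--     i = 0
--     while i < n:
--         if not lines[i].strip():
--             i += 1
--             continue
--         # scan the whole block of consecutive non-blank lines starting at i
--         j = i + 1
--         while j < n and lines[j].strip():
--             j += 1
--         if j - i == 1:  # single-line block: an isolated line
--             stripped = lines[i].strip()
--             if 2 <= len(lines[i].split()) <= 6 and stripped[0].isupper():
--                 return stripped
--         i = j
--     return None
-- ===== Notes on version B (the rewrite author's own statement) =====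
-- stated objective: alternative
-- what changed: B replaces A's per-line scan with neighbour lookups lines[i-1]/lines[i+1] by a two-pointer scan over blocks of consecutive non-blank lines, returning the first single-line block that has 2-6 words and an uppercase first character.
import Mathlib
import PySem

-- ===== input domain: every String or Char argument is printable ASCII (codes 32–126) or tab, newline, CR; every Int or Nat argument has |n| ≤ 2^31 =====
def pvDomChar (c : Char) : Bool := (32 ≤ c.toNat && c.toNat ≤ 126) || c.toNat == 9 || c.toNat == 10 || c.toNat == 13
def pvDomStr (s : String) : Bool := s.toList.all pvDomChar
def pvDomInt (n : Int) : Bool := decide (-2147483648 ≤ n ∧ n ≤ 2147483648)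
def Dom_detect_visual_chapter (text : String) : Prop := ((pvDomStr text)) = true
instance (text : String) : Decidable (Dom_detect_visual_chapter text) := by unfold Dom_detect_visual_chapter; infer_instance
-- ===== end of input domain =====

-- B replaces A's per-line neighbour (prev/next) index checks by a two-pointer scan over
-- blocks of consecutive non-blank lines, testing only single-line blocks (objective: alternative).

-- ===== PORT A =====
-- literal port of A: index loop, per-line neighbour lookups lines[i-1] / lines[i+1]
-- (Python only reads them when in range, so getD never supplies its default)
def detect_visual_chapter_loop (lines : List String) (i : Nat) : Option String :=
  if _h : i < lines.length then
    let line := lines.getD i ""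
    if !(PySem.Str.strip line == "") && decide (2 ≤ (PySem.Str.split₀ line).length)
        && decide ((PySem.Str.split₀ line).length ≤ 6) then
      let prev_empty := i == 0 || PySem.Str.strip (lines.getD (i-1) "") == ""
      let next_empty := decide (lines.length ≤ i + 1) || PySem.Str.strip (lines.getD (i+1) "") == ""
      -- line.strip()[0].isupper(): the strip is non-empty here, so index 0 exists
      let is_title_like := match (PySem.Str.strip line).toList with
        | c :: _ => PySem.Chars.isupper c
        | [] => false
      if prev_empty && next_empty && is_title_like then some (PySem.Str.strip line)
      else detect_visual_chapter_loop lines (i+1)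
    else detect_visual_chapter_loop lines (i+1)
  else none
termination_by lines.length - i

def detect_visual_chapter (text : String) : Option String :=
  detect_visual_chapter_loop (PySem.Str.splitlines (PySem.Str.strip text)) 0

-- ===== PORT B =====
-- inner while: end of the block of consecutive non-blank lines starting at j
def pvBlockEnd (lines : List String) (j : Nat) : Nat :=
  if _h : j < lines.length then
    if !(PySem.Str.strip (lines.getD j "") == "") then pvBlockEnd lines (j+1) else j
  else j
termination_by lines.length - j

-- the port's outer while needs i < pvBlockEnd lines (i+1) to terminate
theorem le_pvBlockEnd (lines : List String) (j : Nat) : j ≤ pvBlockEnd lines j := by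
  fun_induction pvBlockEnd lines j with
  | case1 _ _ _ ih => omega
  | case2 => omega
  | case3 => omega

def detect_visual_chapter_alt_loop (lines : List String) (i : Nat) : Option String :=
  if _h : i < lines.length then
    if PySem.Str.strip (lines.getD i "") == "" then detect_visual_chapter_alt_loop lines (i+1)
    else
      let j := pvBlockEnd lines (i+1)
      if j - i == 1 then
        let stripped := PySem.Str.strip (lines.getD i "")
        if decide (2 ≤ (PySem.Str.split₀ (lines.getD i "")).length)
            && decide ((PySem.Str.split₀ (lines.getD i "")).length ≤ 6)
            && (match stripped.toList with
                | c :: _ => PySem.Chars.isupper c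
                | [] => false) then
          some stripped
        else detect_visual_chapter_alt_loop lines j
      else detect_visual_chapter_alt_loop lines j
  else none
termination_by lines.length - i
decreasing_by
  · omega
  · have := le_pvBlockEnd lines (i+1); omega
  · have := le_pvBlockEnd lines (i+1); omega

def detect_visual_chapter_alt (text : String) : Option String :=
  detect_visual_chapter_alt_loop (PySem.Str.splitlines (PySem.Str.strip text)) 0

-- ===== PRECONDITION & SPEC =====
def Spec_detect_visual_chapter (text : String) (out : Option String) : Prop := out = detect_visual_chapter_alt text
instance (text : String) (out : Option String) : Decidable (Spec_detect_visual_chapter text out) := by unfold Spec_detect_visual_chapter; infer_instance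

-- ===== CLAIM (what is proved, stated in full; the proofs are below) =====
def Claim_equal_detect_visual_chapter : Prop := ∀ (text : String), Dom_detect_visual_chapter text → Spec_detect_visual_chapter text (detect_visual_chapter text)

-- ===== LEMMAS AND PROOFS =====

theorem pvBlockEnd_ge (lines : List String) (j : Nat) (h : lines.length ≤ j) :
    pvBlockEnd lines j = j := by
  rw [pvBlockEnd]; simp [Nat.not_lt.mpr h]

theorem pvBlockEnd_blank (lines : List String) (j : Nat)
    (h : PySem.Str.strip (lines.getD j "") = "") : pvBlockEnd lines j = j := by
  rw [pvBlockEnd]; split_ifs <;> simp_all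

theorem pvBlockEnd_nonblank (lines : List String) (j : Nat) (hj : j < lines.length)
    (h : ¬ PySem.Str.strip (lines.getD j "") = "") :
    pvBlockEnd lines j = pvBlockEnd lines (j+1) := by
  rw [pvBlockEnd]; split_ifs <;> simp_all

-- the joint invariant: from any index i, A's scan equals B's scan when the previous line is
-- blank / absent, and equals B's scan restarted at the end of the current run otherwise
theorem pv_main (lines : List String) (k : Nat) : ∀ i, lines.length - i ≤ k →
    (((i = 0 ∨ PySem.Str.strip (lines.getD (i-1) "") = "") →
        detect_visual_chapter_loop lines i = detect_visual_chapter_alt_loop lines i)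
     ∧ (¬ (i = 0 ∨ PySem.Str.strip (lines.getD (i-1) "") = "") →
        detect_visual_chapter_loop lines i = detect_visual_chapter_alt_loop lines (pvBlockEnd lines i))) := by
  induction k with
  | zero =>
    intro i hi
    have hlen : ¬ i < lines.length := by omega
    refine ⟨fun _ => ?_, fun _ => ?_⟩
    · rw [detect_visual_chapter_loop, detect_visual_chapter_alt_loop]; simp [hlen]
    · rw [detect_visual_chapter_loop, pvBlockEnd_ge lines i (by omega),
        detect_visual_chapter_alt_loop]; simp [hlen]
  | succ k ih =>
    intro i hi
    by_cases hlen : i < lines.length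
    · have hih := ih (i+1) (by omega)
      by_cases hb : PySem.Str.strip (lines.getD i "") = ""
      · -- blank current line: both sides just step to i+1
        have hA : detect_visual_chapter_loop lines i = detect_visual_chapter_loop lines (i+1) := by
          rw [detect_visual_chapter_loop]
          simp only [hlen, dif_pos]
          rw [if_neg (by
            intro h
            rw [Bool.and_eq_true, Bool.and_eq_true, Bool.not_eq_true', beq_eq_false_iff_ne] at h
            exact h.1.1 hb)]
        have hAB : detect_visual_chapter_loop lines (i+1) = detect_visual_chapter_alt_loop lines (i+1) :=
          hih.1 (Or.inr (by rw [Nat.add_sub_cancel]; exact hb))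
        have hBstep : detect_visual_chapter_alt_loop lines i = detect_visual_chapter_alt_loop lines (i+1) := by
          rw [detect_visual_chapter_alt_loop]
          simp only [hlen, dif_pos]
          rw [if_pos (by rw [beq_iff_eq]; exact hb)]
        refine ⟨fun _ => ?_, fun _ => ?_⟩
        · rw [hA, hAB, hBstep]
        · rw [pvBlockEnd_blank lines i hb, hA, hAB, hBstep]
      · -- non-blank current line
        have hAB : detect_visual_chapter_loop lines (i+1)
            = detect_visual_chapter_alt_loop lines (pvBlockEnd lines (i+1)) :=
          hih.2 (by
            rw [Nat.add_sub_cancel]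
            rintro (h | h)
            · omega
            · exact hb h)
        have hj1 : i + 1 ≤ pvBlockEnd lines (i+1) := le_pvBlockEnd lines (i+1)
        -- A's next_empty Bool holds exactly when the block ends right after i
        have hnextiff : ((decide (lines.length ≤ i + 1)
            || PySem.Str.strip (lines.getD (i+1) "") == "") = true)
            ↔ pvBlockEnd lines (i+1) = i + 1 := by
          rw [Bool.or_eq_true, decide_eq_true_eq, beq_iff_eq]
          by_cases h1 : lines.length ≤ i + 1
          · rw [pvBlockEnd_ge lines (i+1) h1]
            exact ⟨fun _ => rfl, fun _ => Or.inl h1⟩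
          · by_cases h2 : PySem.Str.strip (lines.getD (i+1) "") = ""
            · rw [pvBlockEnd_blank lines (i+1) h2]
              exact ⟨fun _ => rfl, fun _ => Or.inr h2⟩
            · rw [pvBlockEnd_nonblank lines (i+1) (by omega) h2]
              have h3 := le_pvBlockEnd lines (i+1+1)
              constructor
              · intro h
                cases h with
                | inl h => omega
                | inr h => exact absurd h h2
              · omega
        refine ⟨fun hpb => ?_, fun hpb => ?_⟩
        · -- previous blank/absent: compare branch by branch
          have hprev : (i == 0 || PySem.Str.strip (lines.getD (i-1) "") == "") = true := by
            rw [Bool.or_eq_true, beq_iff_eq, beq_iff_eq]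
            exact hpb
          rw [detect_visual_chapter_loop, detect_visual_chapter_alt_loop]
          simp only [hlen, dif_pos]
          rw [if_neg (show ¬ ((PySem.Str.strip (lines.getD i "") == "") = true) from by
            rw [beq_iff_eq]; exact hb)]
          by_cases hwc : 2 ≤ (PySem.Str.split₀ (lines.getD i "")).length
              ∧ (PySem.Str.split₀ (lines.getD i "")).length ≤ 6
          · rw [if_pos (by
              simp only [Bool.and_eq_true, Bool.not_eq_true', beq_eq_false_iff_ne, ne_eq,
                decide_eq_true_eq]
              exact ⟨⟨hb, hwc.1⟩, hwc.2⟩)]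
            by_cases hnb : pvBlockEnd lines (i+1) = i + 1
            · rw [if_pos (show ((pvBlockEnd lines (i+1) - i == 1) = true) from by rw [beq_iff_eq]; omega)]
              by_cases ht : (match (PySem.Str.strip (lines.getD i "")).toList with
                  | c :: _ => PySem.Chars.isupper c
                  | [] => false) = true
              · rw [if_pos (show ((i == 0 || PySem.Str.strip (lines.getD (i-1) "") == "") && (decide (lines.length ≤ i + 1) || PySem.Str.strip (lines.getD (i+1) "") == "") && (match (PySem.Str.strip (lines.getD i "")).toList with | c :: _ => PySem.Chars.isupper c | [] => false)) = true from by rw [Bool.and_eq_true, Bool.and_eq_true]; exact ⟨⟨hprev, hnextiff.mpr hnb⟩, ht⟩)]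
                rw [if_pos (show ((decide (2 ≤ (PySem.Str.split₀ (lines.getD i "")).length) && decide ((PySem.Str.split₀ (lines.getD i "")).length ≤ 6) && (match (PySem.Str.strip (lines.getD i "")).toList with | c :: _ => PySem.Chars.isupper c | [] => false)) = true) from by rw [Bool.and_eq_true, Bool.and_eq_true, decide_eq_true_eq, decide_eq_true_eq]; exact ⟨⟨hwc.1, hwc.2⟩, ht⟩)]
              · rw [if_neg (show ¬ ((i == 0 || PySem.Str.strip (lines.getD (i-1) "") == "") && (decide (lines.length ≤ i + 1) || PySem.Str.strip (lines.getD (i+1) "") == "") && (match (PySem.Str.strip (lines.getD i "")).toList with | c :: _ => PySem.Chars.isupper c | [] => false)) = true from by rw [Bool.and_eq_true, Bool.and_eq_true]; intro h; exact ht h.2)]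
                rw [if_neg (show ¬ ((decide (2 ≤ (PySem.Str.split₀ (lines.getD i "")).length) && decide ((PySem.Str.split₀ (lines.getD i "")).length ≤ 6) && (match (PySem.Str.strip (lines.getD i "")).toList with | c :: _ => PySem.Chars.isupper c | [] => false)) = true) from by rw [Bool.and_eq_true, Bool.and_eq_true]; intro h; exact ht h.2)]
                exact hAB
            · rw [if_neg (show ¬ ((pvBlockEnd lines (i+1) - i == 1) = true) from by rw [beq_iff_eq]; omega)]
              rw [if_neg (show ¬ ((i == 0 || PySem.Str.strip (lines.getD (i-1) "") == "") && (decide (lines.length ≤ i + 1) || PySem.Str.strip (lines.getD (i+1) "") == "") && (match (PySem.Str.strip (lines.getD i "")).toList with | c :: _ => PySem.Chars.isupper c | [] => false)) = true from by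
                rw [Bool.and_eq_true, Bool.and_eq_true]
                intro h
                exact hnb (hnextiff.mp h.1.2))]
              exact hAB
          · rw [if_neg (by
              simp only [Bool.and_eq_true, Bool.not_eq_true', beq_eq_false_iff_ne, ne_eq,
                decide_eq_true_eq, not_and]
              intro h h6
              exact hwc ⟨h.2, h6⟩)]
            have hBalt : (if (pvBlockEnd lines (i+1) - i == 1) = true then
                (if (decide (2 ≤ (PySem.Str.split₀ (lines.getD i "")).length)
                    && decide ((PySem.Str.split₀ (lines.getD i "")).length ≤ 6)
                    && (match (PySem.Str.strip (lines.getD i "")).toList with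
                        | c :: _ => PySem.Chars.isupper c
                        | [] => false)) = true then
                  some (PySem.Str.strip (lines.getD i ""))
                 else detect_visual_chapter_alt_loop lines (pvBlockEnd lines (i+1)))
                else detect_visual_chapter_alt_loop lines (pvBlockEnd lines (i+1)))
                = detect_visual_chapter_alt_loop lines (pvBlockEnd lines (i+1)) := by
              split_ifs with e1 e2
              · exfalso
                rw [Bool.and_eq_true, Bool.and_eq_true, decide_eq_true_eq, decide_eq_true_eq] at e2
                exact hwc ⟨e2.1.1, e2.1.2⟩
              · rfl
              · rfl
            rw [hBalt]
            exact hAB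
        · -- previous non-blank: A cannot return here; both skip to the block end
          have hprevf : (i == 0 || PySem.Str.strip (lines.getD (i-1) "") == "") = false := by
            rw [Bool.or_eq_false_iff, beq_eq_false_iff_ne, beq_eq_false_iff_ne]
            rw [not_or] at hpb
            exact ⟨by simpa using hpb.1, hpb.2⟩
          rw [detect_visual_chapter_loop]
          simp only [hlen, dif_pos]
          rw [pvBlockEnd_nonblank lines i hlen hb]
          split_ifs with g1 g2
          · exfalso
            rw [Bool.and_eq_true, Bool.and_eq_true] at g2
            rw [hprevf] at g2
            exact Bool.false_ne_true g2.1.1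
          · exact hAB
          · exact hAB
    · have h1 : pvBlockEnd lines i = i := pvBlockEnd_ge lines i (by omega)
      refine ⟨fun _ => ?_, fun _ => ?_⟩
      · rw [detect_visual_chapter_loop, detect_visual_chapter_alt_loop]; simp [hlen]
      · rw [detect_visual_chapter_loop, h1, detect_visual_chapter_alt_loop]; simp [hlen]

-- ===== VERDICT (by name: the statement is the Claim_ definition above) =====
theorem detect_visual_chapter_spec : Claim_equal_detect_visual_chapter := by
  intro text _
  unfold Spec_detect_visual_chapter detect_visual_chapter detect_visual_chapter_alt
  exact (pv_main (PySem.Str.splitlines (PySem.Str.strip text)) _ 0 le_rfl).1 (Or.inl rfl)
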